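-- pv_equiv track=rewrite | github.com/Aemxander/food-database-project | app.py | formatRestaurantData
-- ===== SOURCE A (Python) =====
-- def formatRestaurantData(restaurantData):
--     # list of data
--     dataList = []
--     formattedDataList = []
--
--     # convert tuple of tuples -> list of lists
--     for i in range(len(restaurantData)):
--         dataList.append(list(restaurantData[i]))
--
--     # format individual times
--     for i in range(len(dataList)):
--         for j in range(5, len(dataList[i])):
--             # if value is not None
--             if dataList[i][j] != None:
--                 # remove leading zero
--                 if dataList[i][j][0] == '0':
--                     dataList[i][j] = dataList[i][j][1:]
--                 # remove trailing zeros
--                 if dataList[i][j][-2:] == '00':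
--                     dataList[i][j] = dataList[i][j][:-3]
--                 # if 10-12 times add AM
--                 if dataList[i][j][:2] in ['24', '10', '11']:
--                     dataList[i][j] = dataList[i][j] + 'AM'
--                 # if 13-24 times add PM
--                 elif dataList[i][j][:2] in ['12', '13', '14', '15', '16', '17', '18', '19', '20', '21', '22', '23']:
--                     pass
--                 # if 1-9 times add AM
--                 else:
--                     dataList[i][j] = dataList[i][j] + 'AM'
--                 # convert 13-24 to 1-12
--                 if dataList[i][j][:2] in ['12', '13', '14', '15', '16', '17', '18', '19', '20', '21', '22', '23']:
--                     value = [None, '12', '13', '14', '15', '16', '17', '18', '19', '20', '21', '22', '23'].index(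
--                         dataList[i][j][:2])
--                     dataList[i][j] = str(value) + 'PM'
--
--     # format day times
--     for i in range(len(dataList)):
--         # duplicate first 5 items
--         formattedDataList.append(dataList[i][0:5])
--
--         # merge open and close times
--         for j in range(5, len(dataList[i]), 2):
--             if dataList[i][j] == None or dataList[i][j + 1] == None:
--                 formattedDataList[i].append('Closed')
--             else:
--                 formattedDataList[i].append(dataList[i][j] + " - " + dataList[i][j + 1])
--
--     # return list of lists
--     return formattedDataList
-- ===== SOURCE B (Python) =====
-- def formatRestaurantData(restaurantData):
--     # precomputed lookup: two-digit 24h prefix -> 12h "PM" display string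
--     pm = {str(h): str(h - 11) + 'PM' for h in range(12, 24)}
--
--     def fmt(s):
--         if s[0] == '0':
--             s = s[1:]
--         if s[-2:] == '00':
--             s = s[:-3]
--         return pm.get(s[:2], s + 'AM')
--
--     def pairs(fields):
--         if not fields:
--             return []
--         o = fields[0]
--         if o is None:
--             cell = 'Closed'
--         else:
--             c = fields[1]
--             cell = 'Closed' if c is None else fmt(o) + ' - ' + fmt(c)
--         return [cell] + pairs(fields[2:])
--
--     return [list(row[:5]) + pairs(list(row[5:])) for row in restaurantData]
-- ===== Notes on version B (the rewrite author's own statement) =====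
-- stated objective: simpler
-- what changed: B replaces A's three index-driven passes (tuple-to-list copy, in-place per-cell reformatting, then an index-stepping merge pass) by a single recursion over each row's tail two fields at a time, and replaces A's elif membership chain plus list.index scan by one precomputed dict lookup (two-digit 24h prefix -> 'PM' string).
import Mathlib
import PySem

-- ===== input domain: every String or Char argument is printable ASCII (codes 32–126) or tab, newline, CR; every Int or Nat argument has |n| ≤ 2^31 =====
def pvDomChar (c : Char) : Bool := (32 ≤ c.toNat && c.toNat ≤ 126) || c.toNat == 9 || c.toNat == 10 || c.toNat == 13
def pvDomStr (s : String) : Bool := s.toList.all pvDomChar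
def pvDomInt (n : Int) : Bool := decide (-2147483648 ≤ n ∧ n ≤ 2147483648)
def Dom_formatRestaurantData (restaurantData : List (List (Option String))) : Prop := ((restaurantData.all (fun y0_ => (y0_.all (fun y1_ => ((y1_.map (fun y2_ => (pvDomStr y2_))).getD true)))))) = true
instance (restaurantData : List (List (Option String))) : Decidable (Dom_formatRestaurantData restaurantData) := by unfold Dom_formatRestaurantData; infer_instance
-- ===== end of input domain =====

-- B replaces A's three index-driven passes and the elif/index-table chain by one recursion over the
-- tail in (open, close) pairs with a precomputed hour→"PM" lookup table (objective: simpler).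

-- the 12 "PM" hour prefixes A tests against (its elif list / the index table's tail)
def pvPmList : List String := ["12", "13", "14", "15", "16", "17", "18", "19", "20", "21", "22", "23"]

-- ===== PORT A =====
-- body of A's second pass for one cell dataList[i][j] (the sequence of rebindings of that cell)
def pvCellA (c : Option String) : Option String :=
  match c with
  | none => none
  | some s =>
    -- remove leading zero
    let s := if PySem.Str.pyGet? s 0 = some '0' then PySem.Str.slice s (some 1) none else s
    -- remove trailing zeros
    let s := if PySem.Str.slice s (some (-2)) none = "00" then PySem.Str.slice s none (some (-3)) else s
    -- AM / pass / AM branches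
    let s :=
      if PySem.Str.slice s none (some 2) ∈ (["24", "10", "11"] : List String) then s ++ "AM"
      else if PySem.Str.slice s none (some 2) ∈ pvPmList then s
      else s ++ "AM"
    -- convert 13-24 to 1-12 via the index table
    if PySem.Str.slice s none (some 2) ∈ pvPmList then
      match PySem.List.index? (none :: pvPmList.map some) (some (PySem.Str.slice s none (some 2))) with
      | some v => some (PySem.Int.toStr (v : Int) ++ "PM")
      | none => some s  -- unreachable: the guard establishes membership
    else some s

def formatRestaurantData (restaurantData : List (List (Option String))) : List (List (Option String)) :=
  -- convert tuple of tuples -> list of lists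
  let dataList := restaurantData.map (fun t => t)
  -- format individual times (in-place update of fields j = 5 .. len-1)
  let dataList := dataList.map (fun row =>
    (PySem.List.pyRange 5 (row.length : Int) 1).foldl
      (fun r j => PySem.List.pySetD r j (pvCellA (PySem.List.pyGetD r j none))) row)
  -- format day times
  dataList.map (fun row =>
    (PySem.List.pyRange 5 (row.length : Int) 2).foldl
      (fun out j =>
        if PySem.List.pyGetD row j none = none ∨ PySem.List.pyGetD row (j + 1) none = none then
          out ++ [some "Closed"]
        else
          out ++ [some ((PySem.List.pyGetD row j none).getD "" ++ " - " ++
                        (PySem.List.pyGetD row (j + 1) none).getD "")])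
      (PySem.List.slice row (some 0) (some 5)))

-- ===== PORT B =====
-- pm = {str(h): str(h-11)+'PM' for h in range(12, 24)}
def pvPM : PySem.Dict String String :=
  (PySem.List.pyRange 12 24 1).foldl
    (fun d h => d.insert (PySem.Int.toStr h) (PySem.Int.toStr (h - 11) ++ "PM")) PySem.Dict.empty

def pvFmt (s : String) : String :=
  let s := if PySem.Str.pyGet? s 0 = some '0' then PySem.Str.slice s (some 1) none else s
  let s := if PySem.Str.slice s (some (-2)) none = "00" then PySem.Str.slice s none (some (-3)) else s
  (PySem.Dict.get? pvPM (PySem.Str.slice s none (some 2))).getD (s ++ "AM")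

-- pairs(fields): recursion over the tail two fields at a time
def pvPairs : List (Option String) → List (Option String)
  | [] => []
  | [_] =>
    -- fields[1] raises IndexError in Python when the lone field is not None (outside Pre_);
    -- when it is None the short-circuit yields 'Closed'; we use that value uniformly here
    [some "Closed"]
  | o :: c :: rest =>
    (match o, c with
     | none, _ => some "Closed"
     | some _, none => some "Closed"
     | some os, some cs => some (pvFmt os ++ " - " ++ pvFmt cs)) :: pvPairs rest

def formatRestaurantData_alt (restaurantData : List (List (Option String))) : List (List (Option String)) :=
  restaurantData.map (fun row =>
    PySem.List.slice row (some 0) (some 5) ++ pvPairs (PySem.List.slice row (some 5) none))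

-- ===== PRECONDITION & SPEC =====
-- Pre_ excludes exactly the inputs on which the Python A raises: an empty string in a time field
-- (index ≥ 5) gives IndexError in the leading-zero test, and an even-length row longer than 5 whose
-- last cell is not None gives IndexError reading the missing closing time dataList[i][j+1].
def Pre_formatRestaurantData (restaurantData : List (List (Option String))) : Prop :=
  ∀ row ∈ restaurantData,
    (row.length ≤ 5 ∨ row.length % 2 = 1 ∨ row.getLast? = some none) ∧
    ∀ c ∈ row.drop 5, c ≠ some ""
instance (restaurantData : List (List (Option String))) : Decidable (Pre_formatRestaurantData restaurantData) := by unfold Pre_formatRestaurantData; infer_instance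
def pvWitness_formatRestaurantData : List (List (Option String)) :=
  [[some "Diner", some "Rome", none, some "5", some "pizza", some "0930", some "2100", none, none]]
def Spec_formatRestaurantData (restaurantData : List (List (Option String))) (out : List (List (Option String))) : Prop := out = formatRestaurantData_alt restaurantData
instance (restaurantData : List (List (Option String))) (out : List (List (Option String))) : Decidable (Spec_formatRestaurantData restaurantData out) := by unfold Spec_formatRestaurantData; infer_instance

-- ===== CLAIM (what is proved, stated in full; the proofs are below) =====
def Claim_equal_formatRestaurantData : Prop := ∀ (restaurantData : List (List (Option String))), Dom_formatRestaurantData restaurantData → Pre_formatRestaurantData restaurantData → Spec_formatRestaurantData restaurantData (formatRestaurantData restaurantData)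

-- ===== LEMMAS AND PROOFS =====

theorem pvWitness_ok : Dom_formatRestaurantData pvWitness_formatRestaurantData ∧
    Pre_formatRestaurantData pvWitness_formatRestaurantData := by decide

-- [:2] of a string, on the character list
theorem pvSlice2_toList (s : String) :
    (PySem.Str.slice s none (some 2)).toList = s.toList.take 2 := by
  simp [pysem]

-- appending "AM" does not change [:2] when the string already has ≥ 2 characters
theorem pvSlice2_append (s : String) (h : 2 ≤ s.toList.length) :
    PySem.Str.slice (s ++ "AM") none (some 2) = PySem.Str.slice s none (some 2) := by
  apply String.toList_inj.mp
  simp [pysem, String.toList_append, List.take_append_of_le_length h]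

-- appending "AM" cannot create a PM prefix
theorem pvNotPm_append (s : String) (h : PySem.Str.slice s none (some 2) ∉ pvPmList) :
    PySem.Str.slice (s ++ "AM") none (some 2) ∉ pvPmList := by
  rcases hl : s.toList with _ | ⟨c, _ | ⟨d, rest⟩⟩
  · intro hm
    simp only [pvPmList, List.mem_cons, List.not_mem_nil, or_false] at hm
    rcases hm with hm|hm|hm|hm|hm|hm|hm|hm|hm|hm|hm|hm <;>
      (apply_fun String.toList at hm; rw [pvSlice2_toList, String.toList_append, hl] at hm; simp_all)
  · intro hm
    simp only [pvPmList, List.mem_cons, List.not_mem_nil, or_false] at hm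
    rcases hm with hm|hm|hm|hm|hm|hm|hm|hm|hm|hm|hm|hm <;>
      (apply_fun String.toList at hm; rw [pvSlice2_toList, String.toList_append, hl] at hm; simp_all)
  · rw [pvSlice2_append s (by rw [hl]; simp)]
    exact h

-- a string whose [:2] is one of "24"/"10"/"11" has at least two characters
theorem pvLen2_of_mem (s : String)
    (h : PySem.Str.slice s none (some 2) ∈ (["24","10","11"] : List String)) :
    2 ≤ s.toList.length := by
  rw [String.length_toList]
  simp only [List.mem_cons, List.not_mem_nil, or_false] at h
  rcases h with h|h|h <;>
    (apply_fun String.toList at h; rw [pvSlice2_toList] at h;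
     have h2 := congrArg List.length h; simp at h2; omega)

-- the lookup table as a literal, and its two lookup facts
theorem pvPM_eq : pvPM = PySem.Dict.mk
    [("12","1PM"),("13","2PM"),("14","3PM"),("15","4PM"),("16","5PM"),("17","6PM"),
     ("18","7PM"),("19","8PM"),("20","9PM"),("21","10PM"),("22","11PM"),("23","12PM")] := by
  decide

theorem pvPM_get_of_not_mem (p : String) (h : p ∉ pvPmList) :
    PySem.Dict.get? pvPM p = none := by
  simp only [pvPmList, List.mem_cons, List.not_mem_nil, or_false, not_or] at h
  obtain ⟨h1,h2,h3,h4,h5,h6,h7,h8,h9,h10,h11,h12⟩ := h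
  rw [pvPM_eq]
  simp only [PySem.Dict.get?_mk_cons, beq_iff_eq]
  rw [if_neg (fun hc => h1 hc.symm), if_neg (fun hc => h2 hc.symm),
      if_neg (fun hc => h3 hc.symm), if_neg (fun hc => h4 hc.symm),
      if_neg (fun hc => h5 hc.symm), if_neg (fun hc => h6 hc.symm),
      if_neg (fun hc => h7 hc.symm), if_neg (fun hc => h8 hc.symm),
      if_neg (fun hc => h9 hc.symm), if_neg (fun hc => h10 hc.symm),
      if_neg (fun hc => h11 hc.symm), if_neg (fun hc => h12 hc.symm)]
  rfl

-- the per-cell transformation of A's format pass equals B's fmt helper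
theorem pvCellA_eq (s : String) : pvCellA (some s) = some (pvFmt s) := by
  simp only [pvCellA, pvFmt]
  generalize (if PySem.Str.pyGet? s 0 = some '0' then PySem.Str.slice s (some 1) none else s) = s1
  generalize (if PySem.Str.slice s1 (some (-2)) none = "00" then PySem.Str.slice s1 none (some (-3)) else s1) = s2
  by_cases h0 : PySem.Str.slice s2 none (some 2) ∈ (["24", "10", "11"] : List String)
  · simp only [if_pos h0]
    rw [pvSlice2_append s2 (pvLen2_of_mem s2 h0)]
    have hnot : PySem.Str.slice s2 none (some 2) ∉ pvPmList := by
      simp only [List.mem_cons, List.not_mem_nil, or_false] at h0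
      rcases h0 with h|h|h <;> rw [h] <;> decide
    rw [if_neg hnot, pvPM_get_of_not_mem _ hnot]
    rfl
  · by_cases h1 : PySem.Str.slice s2 none (some 2) ∈ pvPmList
    · simp only [if_neg h0, if_pos h1]
      simp only [pvPmList, List.mem_cons, List.not_mem_nil, or_false] at h1
      rcases h1 with h|h|h|h|h|h|h|h|h|h|h|h
      · rw [h, show PySem.List.index? (none :: List.map some pvPmList) (some "12") = some 1 from by decide,
            show pvPM.get? "12" = some "1PM" from by decide, Option.getD_some]
        rfl
      · rw [h, show PySem.List.index? (none :: List.map some pvPmList) (some "13") = some 2 from by decide,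
            show pvPM.get? "13" = some "2PM" from by decide, Option.getD_some]
        rfl
      · rw [h, show PySem.List.index? (none :: List.map some pvPmList) (some "14") = some 3 from by decide,
            show pvPM.get? "14" = some "3PM" from by decide, Option.getD_some]
        rfl
      · rw [h, show PySem.List.index? (none :: List.map some pvPmList) (some "15") = some 4 from by decide,
            show pvPM.get? "15" = some "4PM" from by decide, Option.getD_some]
        rfl
      · rw [h, show PySem.List.index? (none :: List.map some pvPmList) (some "16") = some 5 from by decide,
            show pvPM.get? "16" = some "5PM" from by decide, Option.getD_some]
        rfl
      · rw [h, show PySem.List.index? (none :: List.map some pvPmList) (some "17") = some 6 from by decide,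
            show pvPM.get? "17" = some "6PM" from by decide, Option.getD_some]
        rfl
      · rw [h, show PySem.List.index? (none :: List.map some pvPmList) (some "18") = some 7 from by decide,
            show pvPM.get? "18" = some "7PM" from by decide, Option.getD_some]
        rfl
      · rw [h, show PySem.List.index? (none :: List.map some pvPmList) (some "19") = some 8 from by decide,
            show pvPM.get? "19" = some "8PM" from by decide, Option.getD_some]
        rfl
      · rw [h, show PySem.List.index? (none :: List.map some pvPmList) (some "20") = some 9 from by decide,
            show pvPM.get? "20" = some "9PM" from by decide, Option.getD_some]
        rfl
      · rw [h, show PySem.List.index? (none :: List.map some pvPmList) (some "21") = some 10 from by decide,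
            show pvPM.get? "21" = some "10PM" from by decide, Option.getD_some]
        rfl
      · rw [h, show PySem.List.index? (none :: List.map some pvPmList) (some "22") = some 11 from by decide,
            show pvPM.get? "22" = some "11PM" from by decide, Option.getD_some]
        rfl
      · rw [h, show PySem.List.index? (none :: List.map some pvPmList) (some "23") = some 12 from by decide,
            show pvPM.get? "23" = some "12PM" from by decide, Option.getD_some]
        rfl
    · simp only [if_neg h0, if_neg h1]
      rw [if_neg (pvNotPm_append s2 h1), pvPM_get_of_not_mem _ h1]
      rfl

-- A's in-place format pass, characterised: the first k cells kept, the rest mapped through pvCellA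
theorem pvFmtFold (m : Nat) : ∀ (k : Nat) (row : List (Option String)), row.length - k = m →
    (PySem.List.pyRange (k : Int) (row.length : Int) 1).foldl
      (fun r j => PySem.List.pySetD r j (pvCellA (PySem.List.pyGetD r j none))) row
    = row.take k ++ (row.drop k).map pvCellA := by
  induction m with
  | zero =>
    intro k row hm
    rw [show PySem.List.pyRange (k : Int) (row.length : Int) 1 = [] from by
      rw [PySem.List.pyRange_of_pos _ _ (by omega)]; simp; omega]
    simp [List.drop_eq_nil_of_le (by omega : row.length ≤ k),
          List.take_of_length_le (by omega : row.length ≤ k)]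
  | succ m ih =>
    intro k row hm
    have hk : k < row.length := by omega
    rw [PySem.List.pyRange_one_cons (by exact_mod_cast hk)]
    simp only [List.foldl_cons]
    rw [PySem.List.pySetD_natCast row k _, PySem.List.pyGetD_natCast]
    have hlen : (row.set k (pvCellA (row.getD k none))).length = row.length := by simp
    have hcast : ((k : Int) + 1) = ((k + 1 : Nat) : Int) := by push_cast; ring
    rw [hcast, show (row.length : Int) =
      (((row.set k (pvCellA (row.getD k none))).length : Nat) : Int) from by rw [hlen]]
    rw [ih (k+1) _ (by rw [hlen]; omega)]
    rw [List.set_eq_take_cons_drop _ hk]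
    have h5 : (row.take k).length = k := List.length_take_of_le (le_of_lt hk)
    rw [List.getD_eq_getElem _ _ hk]
    rw [List.take_append, List.drop_append]
    simp [h5, List.take_of_length_le, List.drop_eq_nil_of_le]
    conv_rhs => rw [List.drop_eq_getElem_cons (l := List.map pvCellA row) (by simpa using hk)]
    simp

-- reading a cell of the formatted row
theorem pvRead (row : List (Option String)) (j : Nat) (hj : 5 ≤ j) :
    (row.take 5 ++ (row.drop 5).map pvCellA).getD j none = pvCellA (row.getD j none) := by
  rw [List.getD_eq_getElem?_getD, List.getD_eq_getElem?_getD,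
      List.getElem?_append_right (by rw [List.length_take]; omega)]
  rw [List.getElem?_map, List.getElem?_drop]
  by_cases hl : 5 ≤ row.length
  · rw [show (row.take 5).length = 5 from List.length_take_of_le hl,
        show 5 + (j - 5) = j from by omega]
    cases row[j]? <;> simp [pvCellA]
  · have h1 : row[j]? = none := by rw [List.getElem?_eq_none_iff]; omega
    have h2 : row[5 + (j - (row.take 5).length)]? = none := by
      rw [List.getElem?_eq_none_iff]; omega
    rw [h1, h2]
    simp [pvCellA]

-- cons form of range(k, n, 2)
theorem pvRange2_cons (a b : Int) (h : a < b) :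
    PySem.List.pyRange a b 2 = a :: PySem.List.pyRange (a + 2) b 2 := by
  rw [PySem.List.pyRange_of_pos _ _ (by norm_num), PySem.List.pyRange_of_pos _ _ (by norm_num)]
  rw [if_pos h]
  by_cases h2 : a + 2 < b
  · rw [if_pos h2]
    have hn : ((b - a + 2 - 1) / 2).toNat = ((b - (a + 2) + 2 - 1) / 2).toNat + 1 := by omega
    rw [hn, List.range_succ_eq_map, List.map_cons, List.map_map]
    norm_num
    intro k _
    ring
  · rw [if_neg h2]
    have hn : ((b - a + 2 - 1) / 2).toNat = 1 := by omega
    rw [hn]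
    simp

-- A's merge fold over the formatted row equals pvPairs on the raw tail
theorem pvMerge (row : List (Option String)) (m : Nat) : ∀ (k : Nat) (acc : List (Option String)),
    5 ≤ k → row.length ≤ k + m →
    (PySem.List.pyRange (k : Int) (row.length : Int) 2).foldl
      (fun out j =>
        if PySem.List.pyGetD (row.take 5 ++ (row.drop 5).map pvCellA) j none = none ∨
           PySem.List.pyGetD (row.take 5 ++ (row.drop 5).map pvCellA) (j + 1) none = none then
          out ++ [some "Closed"]
        else
          out ++ [some ((PySem.List.pyGetD (row.take 5 ++ (row.drop 5).map pvCellA) j none).getD "" ++ " - " ++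
                        (PySem.List.pyGetD (row.take 5 ++ (row.drop 5).map pvCellA) (j + 1) none).getD "")])
      acc
    = acc ++ pvPairs (row.drop k) := by
  induction m using Nat.strong_induction_on with
  | _ m ih =>
  intro k acc hk5 hkm
  by_cases hk : k < row.length
  · rw [pvRange2_cons _ _ (by exact_mod_cast hk)]
    simp only [List.foldl_cons]
    have hc1 : ((k : Int) + 1) = ((k + 1 : Nat) : Int) := by push_cast; ring
    have hc2 : ((k : Int) + 2) = ((k + 2 : Nat) : Int) := by push_cast; ring
    have hgk : PySem.List.pyGetD (row.take 5 ++ (row.drop 5).map pvCellA) (k : Int) none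
        = pvCellA (row.getD k none) := by
      rw [PySem.List.pyGetD_natCast]; exact pvRead row k hk5
    have hgk1 : PySem.List.pyGetD (row.take 5 ++ (row.drop 5).map pvCellA) ((k : Int) + 1) none
        = pvCellA (row.getD (k + 1) none) := by
      rw [hc1, PySem.List.pyGetD_natCast]; exact pvRead row (k + 1) (by omega)
    rw [hgk, hgk1]
    by_cases hk1 : k + 1 < row.length
    · have hdrop : row.drop k = row[k] :: row[k + 1] :: row.drop (k + 2) := by
        rw [List.drop_eq_getElem_cons hk, List.drop_eq_getElem_cons hk1]
      rw [hc2, ih (m - 2) (by omega) (k + 2) _ (by omega) (by omega), hdrop,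
          List.getD_eq_getElem _ _ hk, List.getD_eq_getElem _ _ hk1]
      rcases row[k] with _ | os <;> rcases row[k + 1] with _ | cs
      · rw [if_pos (Or.inl (by simp [pvCellA]))]; simp [pvPairs]
      · rw [if_pos (Or.inl (by simp [pvCellA]))]; simp [pvPairs]
      · rw [if_pos (Or.inr (by simp [pvCellA]))]; simp [pvPairs]
      · rw [pvCellA_eq, pvCellA_eq, if_neg (by simp)]
        simp [pvPairs]
    · have hnone : row.getD (k + 1) none = none := List.getD_eq_default _ _ (by omega)
      have hdrop : row.drop k = [row[k]] := by
        rw [List.drop_eq_getElem_cons hk, List.drop_eq_nil_of_le (by omega)]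
      rw [hnone, hc2, ih (m - 1) (by omega) (k + 2) _ (by omega) (by omega), hdrop,
          List.drop_eq_nil_of_le (by omega : row.length ≤ k + 2)]
      rw [if_pos (Or.inr (by simp [pvCellA]))]
      simp [pvPairs]
  · rw [show PySem.List.pyRange (k : Int) (row.length : Int) 2 = [] from by
      rw [PySem.List.pyRange_of_pos _ _ (by norm_num),
          if_neg (by exact_mod_cast hk)]; rfl]
    rw [List.drop_eq_nil_of_le (by omega : row.length ≤ k)]
    simp [pvPairs]

-- per-row equality
theorem pvRow_eq (row : List (Option String)) :
    (let f := (PySem.List.pyRange (5 : Int) (row.length : Int) 1).foldl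
        (fun r j => PySem.List.pySetD r j (pvCellA (PySem.List.pyGetD r j none))) row
     (PySem.List.pyRange 5 (f.length : Int) 2).foldl
      (fun out j =>
        if PySem.List.pyGetD f j none = none ∨ PySem.List.pyGetD f (j + 1) none = none then
          out ++ [some "Closed"]
        else
          out ++ [some ((PySem.List.pyGetD f j none).getD "" ++ " - " ++
                        (PySem.List.pyGetD f (j + 1) none).getD "")])
      (PySem.List.slice f (some 0) (some 5)))
    = PySem.List.slice row (some 0) (some 5) ++ pvPairs (PySem.List.slice row (some 5) none) := by
  have hfold := pvFmtFold (row.length - 5) 5 row rfl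
  rw [show ((5 : Nat) : Int) = (5 : Int) from by norm_num] at hfold
  simp only [hfold]
  have hflen : (row.take 5 ++ (row.drop 5).map pvCellA).length = row.length := by simp; omega
  rw [hflen]
  have hinit : PySem.List.slice (row.take 5 ++ (row.drop 5).map pvCellA) (some 0) (some 5)
      = PySem.List.slice row (some 0) (some 5) := by
    simp [pysem, List.take_append]
    by_cases hl : 5 ≤ row.length
    · rw [show 5 - min 5 row.length = 0 from by omega]
      simp [List.take_take]
    · simp [List.take_take,
        List.drop_eq_nil_of_le (by simp; omega : (List.map pvCellA row).length ≤ 5)]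
  rw [hinit]
  have htail : PySem.List.slice row (some 5) none = row.drop 5 := by
    simp [pysem]
  rw [htail]
  have hm := pvMerge row row.length 5 (PySem.List.slice row (some 0) (some 5)) (le_refl 5) (by omega)
  rw [show ((5 : Nat) : Int) = (5 : Int) from by norm_num] at hm
  exact hm

-- ===== VERDICT (by name: the statement is the Claim_ definition above) =====
theorem formatRestaurantData_spec : Claim_equal_formatRestaurantData := by
  intro rows _ _
  unfold Spec_formatRestaurantData formatRestaurantData formatRestaurantData_alt
  simp only [List.map_map, List.map_id']
  apply List.map_congr_left
  intro row _
  exact pvRow_eq row
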